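-- pv_equiv track=rewrite | github.com/DyogenIBENS/SCORPIOS | scripts/graphs/orthogroups.py | are_species_sep
-- ===== SOURCE A (Python) =====
-- from collections import Counter
--
-- def species_name(gene):
--
--     """
--     Parses gene name to extract species name. Expects species name after the last '_'.
--
--     Args:
--         gene (str): Gene name.
--
--     Returns:
--         str: Species name
--
--     """
--
--     species = gene.split('_')[-1]
--
--     return species
--
-- def are_species_sep(partitions):
--
--     """
--     Checks whether genes (or place-holders loss of a duplicate) of each species are split in the
--     two communities.
--
--     Args:
--         partitions (tuple): Genes in each graph community in tuples of tuple
--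
--     Returns:
--         bool: The return value, True if genes of the same species are in two communities, False
--               otherwise.
--
--     """
--
--     #Sort by order of length, to extract only the two main partitions.
--     partitions = list(partitions)
--     partitions.sort(key=len, reverse=True)
--     total_species = partitions[0].union(partitions[1])
--
--     #Filter out species with only one representative.
--     all_sp = [species_name(i) for i in total_species]
--     count = Counter(all_sp)
--     to_filter = [k for k in count if count[k] == 1]
--
--     #Find species unique to partition1 or unique to partition2.
--     seen_part1 = {species_name(i) for i in partitions[0] if species_name(i) not in to_filter}
--     seen_part2 = {species_name(i) for i in partitions[1] if species_name(i) not in to_filter}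
--     non_sep = len(seen_part1 - seen_part2) + len(seen_part2 - seen_part1)
--
--     return non_sep
-- ===== SOURCE B (Python) =====
-- def species_name(gene):
--     return gene.split('_')[-1]
--
-- def are_species_sep(partitions):
--     partitions = list(partitions)
--     partitions.sort(key=len, reverse=True)
--     part1, part2 = partitions[0], partitions[1]
--     info = {}
--     for gene in part1.union(part2):
--         sp = species_name(gene)
--         rec = info.get(sp, (0, False, False))
--         info[sp] = (rec[0] + 1, rec[1] or gene in part1, rec[2] or gene in part2)
--     return sum(1 for c, f1, f2 in info.values() if c >= 2 and f1 != f2)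
-- ===== Notes on version B (the rewrite author's own statement) =====
-- stated objective: alternative
-- what changed: Replaces A's staged pipeline (Counter over the union, a to_filter singleton list, two filtered gene-level set comprehensions, two set differences) with a single accumulation pass over the union building one dict species -> (count, seen-in-part1, seen-in-part2), followed by one reduction counting records with count >= 2 and differing flags.
import Mathlib
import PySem

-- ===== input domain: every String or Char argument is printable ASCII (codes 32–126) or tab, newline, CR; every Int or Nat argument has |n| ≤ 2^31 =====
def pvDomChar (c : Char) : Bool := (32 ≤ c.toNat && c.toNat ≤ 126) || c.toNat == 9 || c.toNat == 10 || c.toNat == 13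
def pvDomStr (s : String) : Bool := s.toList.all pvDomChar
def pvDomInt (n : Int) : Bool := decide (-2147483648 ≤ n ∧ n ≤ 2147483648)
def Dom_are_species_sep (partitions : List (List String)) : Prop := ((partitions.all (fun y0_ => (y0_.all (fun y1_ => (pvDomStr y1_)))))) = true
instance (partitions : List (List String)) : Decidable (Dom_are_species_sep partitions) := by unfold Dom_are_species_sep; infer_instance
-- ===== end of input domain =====

-- B replaces A's staged pipeline (Counter over the union, to_filter singleton list, two filtered
-- gene-level set comprehensions, two set differences) with ONE accumulation pass over the union
-- building a dict species -> (count, seen-in-part1, seen-in-part2) and ONE reduction over its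
-- values (objective: alternative).

-- ===== PORT A =====
-- species_name: gene.split('_')[-1]; '_' ≠ '' so split? is always some, and split never
-- returns an empty list, so the [-1] index always exists — the two getD defaults are unreachable.
def species_name (gene : String) : String :=
  let parts := (PySem.Str.split? gene "_").getD []
  (PySem.List.pyGet? parts (-1)).getD ""

def are_species_sep (partitions : List (List String)) : Int :=
  -- each argument element is a Python set: decode it as PySem.Set
  let parts := partitions.map PySem.Set.ofList
  let parts := PySem.List.sorted parts PySem.Set.len true
  match PySem.List.pyGet? parts 0, PySem.List.pyGet? parts 1 with
  | some part0, some part1 =>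
    let total_species := PySem.Set.union part0 part1
    let all_sp := total_species.map species_name
    let count := PySem.Dict.counter all_sp
    -- count[k] with k ∈ count.keys never raises: getD is exact here
    let to_filter := count.keys.filter (fun k => count.getD k 0 == 1)
    let seen_part1 : PySem.Set String :=
      PySem.Set.ofList ((part0.filter (fun i => !(to_filter.contains (species_name i)))).map species_name)
    let seen_part2 : PySem.Set String :=
      PySem.Set.ofList ((part1.filter (fun i => !(to_filter.contains (species_name i)))).map species_name)
    PySem.Set.len (PySem.Set.diff seen_part1 seen_part2) + PySem.Set.len (PySem.Set.diff seen_part2 seen_part1)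
  | _, _ => 0  -- IndexError (fewer than two partitions); excluded by Pre_

-- ===== PORT B =====
def are_species_sep_alt (partitions : List (List String)) : Int :=
  let parts := PySem.List.sorted (partitions.map PySem.Set.ofList) PySem.Set.len true
  match PySem.List.pyGet? parts 0 with
  | none => 0  -- IndexError (no partitions); excluded by Pre_
  | some part1 =>
    match PySem.List.pyGet? parts 1 with
    | none => 0  -- IndexError (a single partition); excluded by Pre_
    | some part2 =>
      -- one pass over the union: info[sp] = (count, seen in part1, seen in part2);
      -- the returned sum does not depend on the set's iteration order
      let info := (PySem.Set.union part1 part2).foldl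
        (fun (d : PySem.Dict String (Int × Bool × Bool)) gene =>
          let sp := species_name gene
          let rec0 := d.getD sp (0, false, false)
          d.insert sp (rec0.1 + 1, rec0.2.1 || part1.contains gene, rec0.2.2 || part2.contains gene))
        PySem.Dict.empty
      info.values.foldl (fun acc r => if 2 ≤ r.1 ∧ r.2.1 ≠ r.2.2 then acc + 1 else acc) 0

-- ===== PRECONDITION & SPEC =====
-- A indexes partitions[0] and partitions[1] after sorting: fewer than two partitions raise IndexError.
def Pre_are_species_sep (partitions : List (List String)) : Prop := 2 ≤ partitions.length
instance (partitions : List (List String)) : Decidable (Pre_are_species_sep partitions) := by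
  unfold Pre_are_species_sep; infer_instance

def pvWitness_are_species_sep : List (List String) := [["g1_sp1", "g2_sp1"], ["g3_sp2"]]

def Spec_are_species_sep (partitions : List (List String)) (out : Int) : Prop := out = are_species_sep_alt partitions
instance (partitions : List (List String)) (out : Int) : Decidable (Spec_are_species_sep partitions out) := by unfold Spec_are_species_sep; infer_instance

-- ===== CLAIM (what is proved, stated in full; the proofs are below) =====
def Claim_equal_are_species_sep : Prop := ∀ (partitions : List (List String)), Dom_are_species_sep partitions → Pre_are_species_sep partitions → Spec_are_species_sep partitions (are_species_sep partitions)

-- ===== LEMMAS AND PROOFS =====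

-- membership in A's filtered species set: in the species set of the part AND multiplicity ≥ 2 in all_sp
theorem mem_seen (p u : List String) (hsub : ∀ g ∈ p, g ∈ u) (s : String) :
    s ∈ PySem.Set.ofList ((p.filter (fun i =>
        !(((PySem.Dict.counter (u.map species_name)).keys.filter
            (fun k => (PySem.Dict.counter (u.map species_name)).getD k 0 == 1)).contains
          (species_name i)))).map species_name)
      ↔ s ∈ PySem.Set.ofList (p.map species_name) ∧
          2 ≤ PySem.List.count (u.map species_name) s := by
  simp only [PySem.Set.mem_ofList, List.mem_map, List.mem_filter, PySem.List.count_eq]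
  constructor
  · rintro ⟨g, ⟨hg, hcond⟩, rfl⟩
    have hmem : species_name g ∈ u.map species_name := List.mem_map_of_mem (hsub g hg)
    have hpos : 0 < List.count (species_name g) (u.map species_name) :=
      List.count_pos_iff.mpr hmem
    simp only [Bool.not_eq_eq_eq_not, Bool.not_true, List.contains_eq_mem,
      decide_eq_false_iff_not, List.mem_filter, PySem.Dict.keys_counter,
      PySem.Set.mem_ofList, PySem.Dict.getD_counter, beq_iff_eq, not_and] at hcond
    have h1 : List.count (species_name g) (u.map species_name) ≠ 1 := by
      intro h; exact absurd (by exact_mod_cast h) (hcond hmem)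
    exact ⟨⟨g, hg, rfl⟩, by omega⟩
  · rintro ⟨⟨g, hg, rfl⟩, hcnt⟩
    refine ⟨g, ⟨hg, ?_⟩, rfl⟩
    simp only [Bool.not_eq_eq_eq_not, Bool.not_true, List.contains_eq_mem,
      decide_eq_false_iff_not, List.mem_filter, PySem.Dict.keys_counter,
      PySem.Set.mem_ofList, PySem.Dict.getD_counter, beq_iff_eq, not_and]
    intro _ h
    have : List.count (species_name g) (u.map species_name) = 1 := by exact_mod_cast h
    omega

-- one side of the split: |seenᵢ - seenⱼ| = countP (count ≥ 2) over (spᵢ - spⱼ)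
theorem len_diff_seen (p q u : List String) (hp : ∀ g ∈ p, g ∈ u) (hq : ∀ g ∈ q, g ∈ u) :
    PySem.Set.len (PySem.Set.diff
        (PySem.Set.ofList ((p.filter (fun i =>
          !(((PySem.Dict.counter (u.map species_name)).keys.filter
              (fun k => (PySem.Dict.counter (u.map species_name)).getD k 0 == 1)).contains
            (species_name i)))).map species_name))
        (PySem.Set.ofList ((q.filter (fun i =>
          !(((PySem.Dict.counter (u.map species_name)).keys.filter
              (fun k => (PySem.Dict.counter (u.map species_name)).getD k 0 == 1)).contains
            (species_name i)))).map species_name)))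
      = ((PySem.Set.diff (PySem.Set.ofList (p.map species_name))
            (PySem.Set.ofList (q.map species_name))).countP
          (fun s => decide (2 ≤ PySem.List.count (u.map species_name) s)) : Int) := by
  have hperm : (PySem.Set.diff
        (PySem.Set.ofList ((p.filter (fun i =>
          !(((PySem.Dict.counter (u.map species_name)).keys.filter
              (fun k => (PySem.Dict.counter (u.map species_name)).getD k 0 == 1)).contains
            (species_name i)))).map species_name))
        (PySem.Set.ofList ((q.filter (fun i =>
          !(((PySem.Dict.counter (u.map species_name)).keys.filter
              (fun k => (PySem.Dict.counter (u.map species_name)).getD k 0 == 1)).contains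
            (species_name i)))).map species_name))).Perm
      ((PySem.Set.diff (PySem.Set.ofList (p.map species_name))
          (PySem.Set.ofList (q.map species_name))).filter
        (fun s => decide (2 ≤ PySem.List.count (u.map species_name) s))) := by
    rw [List.perm_ext_iff_of_nodup
      (PySem.Set.nodup_diff _ _ (PySem.Set.nodup_ofList _))
      (List.Nodup.filter _ (PySem.Set.nodup_diff _ _ (PySem.Set.nodup_ofList _)))]
    intro s
    rw [List.mem_filter, PySem.Set.mem_diff, PySem.Set.mem_diff, mem_seen p u hp s,
      mem_seen q u hq s]
    simp only [decide_eq_true_eq]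
    constructor
    · rintro ⟨⟨h1, h2⟩, h3⟩
      exact ⟨⟨h1, fun hs2 => h3 ⟨hs2, h2⟩⟩, h2⟩
    · rintro ⟨⟨h1, h2⟩, h3⟩
      exact ⟨⟨h1, h3⟩, fun hx => h2 hx.1⟩
  simp only [PySem.Set.len, hperm.length_eq, ← List.countP_eq_length_filter]

-- B's dict after the accumulation pass: record at sp = (count of sp, flag for p, flag for q)
theorem getD_info (p1 p2 : List String) (l : List String)
    (d : PySem.Dict String (Int × Bool × Bool)) (sp : String) :
    (l.foldl (fun (d : PySem.Dict String (Int × Bool × Bool)) gene =>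
        d.insert (species_name gene)
          ((d.getD (species_name gene) (0, false, false)).1 + 1,
           (d.getD (species_name gene) (0, false, false)).2.1 || p1.contains gene,
           (d.getD (species_name gene) (0, false, false)).2.2 || p2.contains gene)) d).getD
      sp (0, false, false)
    = ((d.getD sp (0, false, false)).1 + ((l.map species_name).count sp : Int),
       (d.getD sp (0, false, false)).2.1
         || l.any (fun g => species_name g == sp && p1.contains g),
       (d.getD sp (0, false, false)).2.2
         || l.any (fun g => species_name g == sp && p2.contains g)) := by
  induction l generalizing d with
  | nil => simp
  | cons g l ih =>
    simp only [List.foldl_cons, ih, List.map_cons, List.any_cons, List.count_cons,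
      PySem.Dict.getD_insert]
    by_cases h : sp = species_name g
    · subst h
      simp only [beq_self_eq_true, Bool.true_and, if_pos]
      push_cast
      refine Prod.ext (by ring) (Prod.ext ?_ ?_) <;> simp [Bool.or_assoc, Bool.or_comm, Bool.or_left_comm]
    · have hb : (species_name g == sp) = false := by
        simp only [beq_eq_false_iff_ne]; exact Ne.symm h
      simp [if_neg h, hb]

-- a partition flag is species-set membership (for a part contained in the union)
theorem flag_iff (q u : List String) (hq : ∀ g ∈ q, g ∈ u) (sp : String) :
    (u.any (fun g => species_name g == sp && q.contains g)) = true
      ↔ sp ∈ PySem.Set.ofList (q.map species_name) := by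
  simp only [List.any_eq_true, Bool.and_eq_true, beq_iff_eq, List.contains_eq_mem,
    decide_eq_true_eq, PySem.Set.mem_ofList, List.mem_map]
  constructor
  · rintro ⟨g, _, rfl, hgq⟩; exact ⟨g, hgq, rfl⟩
  · rintro ⟨g, hgq, rfl⟩; exact ⟨g, hq g hgq, rfl, hgq⟩

-- the reduction over B's records = A's two set-difference cardinalities
theorem bridge (p1 p2 : List String) :
    ((PySem.Set.ofList (((PySem.Set.union p1 p2 : List String)).map species_name)).countP
        (fun sp => decide (2 ≤ (PySem.List.count ((PySem.Set.union p1 p2 : List String).map species_name) sp : Int)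
          ∧ ((PySem.Set.union p1 p2 : List String).any (fun g => species_name g == sp && p1.contains g))
            ≠ ((PySem.Set.union p1 p2 : List String).any (fun g => species_name g == sp && p2.contains g)))) : Nat)
    = (PySem.Set.symmDiff (PySem.Set.ofList (p1.map species_name))
          (PySem.Set.ofList (p2.map species_name))).countP
        (fun s => decide (2 ≤ PySem.List.count ((PySem.Set.union p1 p2 : List String).map species_name) s)) := by
  have hp : ∀ g ∈ p1, g ∈ (PySem.Set.union p1 p2 : List String) := by
    intro g hg; exact (PySem.Set.mem_union p1 p2 g).mpr (Or.inl hg)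
  have hq : ∀ g ∈ p2, g ∈ (PySem.Set.union p1 p2 : List String) := by
    intro g hg; exact (PySem.Set.mem_union p1 p2 g).mpr (Or.inr hg)
  rw [List.countP_eq_length_filter, List.countP_eq_length_filter]
  apply List.Perm.length_eq
  rw [List.perm_ext_iff_of_nodup
    (List.Nodup.filter _ (PySem.Set.nodup_ofList _))
    (List.Nodup.filter _ (PySem.Set.nodup_symmDiff _ _ (PySem.Set.nodup_ofList _) (PySem.Set.nodup_ofList _)))]
  intro s
  have e1 : ((PySem.Set.union p1 p2 : List String).any
      (fun g => species_name g == s && p1.contains g))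
      = decide (s ∈ PySem.Set.ofList (p1.map species_name)) := by
    rw [Bool.eq_iff_iff, decide_eq_true_eq]; exact flag_iff p1 _ hp s
  have e2 : ((PySem.Set.union p1 p2 : List String).any
      (fun g => species_name g == s && p2.contains g))
      = decide (s ∈ PySem.Set.ofList (p2.map species_name)) := by
    rw [Bool.eq_iff_iff, decide_eq_true_eq]; exact flag_iff p2 _ hq s
  have himp1 : s ∈ PySem.Set.ofList (p1.map species_name) →
      s ∈ PySem.Set.ofList ((PySem.Set.union p1 p2 : List String).map species_name) := by
    simp only [PySem.Set.mem_ofList, List.mem_map]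
    rintro ⟨g, hg, rfl⟩; exact ⟨g, hp g hg, rfl⟩
  have himp2 : s ∈ PySem.Set.ofList (p2.map species_name) →
      s ∈ PySem.Set.ofList ((PySem.Set.union p1 p2 : List String).map species_name) := by
    simp only [PySem.Set.mem_ofList, List.mem_map]
    rintro ⟨g, hg, rfl⟩; exact ⟨g, hq g hg, rfl⟩
  have hcast : (2 ≤ (PySem.List.count ((PySem.Set.union p1 p2 : List String).map species_name) s : Int))
      ↔ 2 ≤ PySem.List.count ((PySem.Set.union p1 p2 : List String).map species_name) s := by
    exact_mod_cast Iff.rfl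
  simp only [List.mem_filter, decide_eq_true_eq, PySem.Set.mem_symmDiff, e1, e2,
    ne_eq, decide_eq_decide, hcast]
  tauto

-- both branches agree for any two parts p0 p1
theorem are_species_sep_core (p0 p1 : List String) :
    (let total_species := PySem.Set.union p0 p1
     let all_sp := total_species.map species_name
     let count := PySem.Dict.counter all_sp
     let to_filter := count.keys.filter (fun k => count.getD k 0 == 1)
     let seen_part1 : PySem.Set String :=
       PySem.Set.ofList ((p0.filter (fun i => !(to_filter.contains (species_name i)))).map species_name)
     let seen_part2 : PySem.Set String :=
       PySem.Set.ofList ((p1.filter (fun i => !(to_filter.contains (species_name i)))).map species_name)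
     PySem.Set.len (PySem.Set.diff seen_part1 seen_part2) + PySem.Set.len (PySem.Set.diff seen_part2 seen_part1))
    =
    (let info := (PySem.Set.union p0 p1).foldl
        (fun (d : PySem.Dict String (Int × Bool × Bool)) gene =>
          let sp := species_name gene
          let rec0 := d.getD sp (0, false, false)
          d.insert sp (rec0.1 + 1, rec0.2.1 || p0.contains gene, rec0.2.2 || p1.contains gene))
        PySem.Dict.empty
     info.values.foldl (fun acc r => if 2 ≤ r.1 ∧ r.2.1 ≠ r.2.2 then acc + 1 else acc) 0) := by
  have hp : ∀ g ∈ p0, g ∈ (PySem.Set.union p0 p1 : List String) := by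
    intro g hg; exact (PySem.Set.mem_union p0 p1 g).mpr (Or.inl hg)
  have hq : ∀ g ∈ p1, g ∈ (PySem.Set.union p0 p1 : List String) := by
    intro g hg; exact (PySem.Set.mem_union p0 p1 g).mpr (Or.inr hg)
  simp only
  -- B side: values of the accumulated dict, then the reduction as a countP
  have hnd : ((PySem.Set.union p0 p1 : List String).foldl
      (fun (d : PySem.Dict String (Int × Bool × Bool)) gene =>
        d.insert (species_name gene)
          ((d.getD (species_name gene) (0, false, false)).1 + 1,
           (d.getD (species_name gene) (0, false, false)).2.1 || p0.contains gene,
           (d.getD (species_name gene) (0, false, false)).2.2 || p1.contains gene))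
      PySem.Dict.empty).keys.Nodup :=
    PySem.Dict.nodup_keys_foldl_insert_key _ _ _ _ PySem.Dict.nodup_keys_empty
  rw [PySem.List.foldl_ite_add_one (fun (r : Int × Bool × Bool) => 2 ≤ r.1 ∧ r.2.1 ≠ r.2.2)]
  rw [PySem.Dict.values_eq_map_keys _ hnd (0, false, false)]
  rw [PySem.Dict.keys_foldl_insert_key]
  rw [PySem.Dict.keys_empty, PySem.Set.update_nil_left]
  rw [List.countP_map]
  have hpredeq : ∀ sp,
      ((fun (r : Int × Bool × Bool) => decide (2 ≤ r.1 ∧ r.2.1 ≠ r.2.2)) ∘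
        (fun k => ((PySem.Set.union p0 p1 : List String).foldl
          (fun (d : PySem.Dict String (Int × Bool × Bool)) gene =>
            d.insert (species_name gene)
              ((d.getD (species_name gene) (0, false, false)).1 + 1,
               (d.getD (species_name gene) (0, false, false)).2.1 || p0.contains gene,
               (d.getD (species_name gene) (0, false, false)).2.2 || p1.contains gene))
          PySem.Dict.empty).getD k (0, false, false))) sp
      = decide (2 ≤ (PySem.List.count ((PySem.Set.union p0 p1 : List String).map species_name) sp : Int)
          ∧ ((PySem.Set.union p0 p1 : List String).any (fun g => species_name g == sp && p0.contains g))
            ≠ ((PySem.Set.union p0 p1 : List String).any (fun g => species_name g == sp && p1.contains g))) := by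
    intro sp
    simp only [Function.comp, getD_info p0 p1 _ PySem.Dict.empty sp, PySem.Dict.getD_empty,
      Bool.false_or, zero_add, PySem.List.count_eq]
    exact decide_eq_decide.mpr Iff.rfl
  rw [List.countP_congr (fun sp _ => by rw [hpredeq sp])]
  -- A side
  rw [len_diff_seen p0 p1 (PySem.Set.union p0 p1) hp hq,
      len_diff_seen p1 p0 (PySem.Set.union p0 p1) hq hp]
  have hb := bridge p0 p1
  rw [PySem.Set.symmDiff, List.countP_append] at hb
  rw [hb]
  push_cast
  ring

-- ===== VERDICT (by name: the statement is the Claim_ definition above) =====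
theorem are_species_sep_spec : Claim_equal_are_species_sep := by
  intro partitions _ hpre
  unfold Spec_are_species_sep are_species_sep are_species_sep_alt
  simp only
  have hlen : (PySem.List.sorted (partitions.map PySem.Set.ofList) PySem.Set.len true).length
      = partitions.length := by
    rw [PySem.List.length_sorted, List.length_map]
  have h0 : (0 : Nat) < (PySem.List.sorted (partitions.map PySem.Set.ofList) PySem.Set.len true).length := by
    unfold Pre_are_species_sep at hpre; omega
  have h1 : (1 : Nat) < (PySem.List.sorted (partitions.map PySem.Set.ofList) PySem.Set.len true).length := by
    unfold Pre_are_species_sep at hpre; omega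
  have g0 : PySem.List.pyGet? (PySem.List.sorted (partitions.map PySem.Set.ofList) PySem.Set.len true) 0
      = some ((PySem.List.sorted (partitions.map PySem.Set.ofList) PySem.Set.len true)[(0 : Nat)]) := by
    rw [show (0 : Int) = ((0 : Nat) : Int) by norm_num, PySem.List.pyGet?_natCast,
      List.getElem?_eq_getElem h0]
  have g1 : PySem.List.pyGet? (PySem.List.sorted (partitions.map PySem.Set.ofList) PySem.Set.len true) 1
      = some ((PySem.List.sorted (partitions.map PySem.Set.ofList) PySem.Set.len true)[(1 : Nat)]) := by
    rw [show (1 : Int) = ((1 : Nat) : Int) by norm_num, PySem.List.pyGet?_natCast,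
      List.getElem?_eq_getElem h1]
  rw [g0, g1]
  dsimp only
  exact are_species_sep_core
    ((PySem.List.sorted (partitions.map PySem.Set.ofList) PySem.Set.len true)[(0 : Nat)])
    ((PySem.List.sorted (partitions.map PySem.Set.ofList) PySem.Set.len true)[(1 : Nat)])
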